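-- pv_equiv track=rewrite | github.com/djk121/fitparse | tools/dump_fit_messages.py | set_bit_ranges
-- ===== SOURCE A (Python) =====
-- def set_bit_ranges(bits):
--     bit_ranges = []
--     range_begin = 0
--     for bit_amt in bits:
--         range_end = range_begin + bit_amt
--         bit_ranges.append((range_begin, bit_amt))
--         range_begin = range_end
--
--     return bit_ranges
-- ===== SOURCE B (Python) =====
-- def set_bit_ranges(bits):
--     bits = list(bits)
--     end = sum(bits)
--     out = []
--     for amt in reversed(bits):
--         end -= amt
--         out.append((end, amt))
--     out.reverse()
--     return out
-- ===== Notes on version B (the rewrite author's own statement) =====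
-- stated objective: alternative
-- what changed: B builds the result back-to-front: it totals the amounts once, then walks the list in reverse deriving each start by subtracting the amount from the running end, and reverses the output, instead of A's forward loop threading a running start offset.
import Mathlib
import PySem

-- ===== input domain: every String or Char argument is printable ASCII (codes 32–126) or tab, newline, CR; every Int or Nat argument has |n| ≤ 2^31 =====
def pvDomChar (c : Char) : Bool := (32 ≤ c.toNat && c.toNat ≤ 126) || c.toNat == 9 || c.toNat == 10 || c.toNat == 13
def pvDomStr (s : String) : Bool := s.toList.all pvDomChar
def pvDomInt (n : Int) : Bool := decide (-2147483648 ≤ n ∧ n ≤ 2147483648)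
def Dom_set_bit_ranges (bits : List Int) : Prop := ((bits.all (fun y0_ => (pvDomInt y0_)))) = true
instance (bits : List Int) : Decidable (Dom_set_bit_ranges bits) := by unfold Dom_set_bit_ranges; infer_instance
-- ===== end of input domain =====

-- B builds the result back-to-front (total the amounts, walk the list in reverse subtracting
-- each amount to recover its start, then reverse), instead of A's forward running-offset loop.

-- ===== PORT A =====
-- literal port of A: one forward loop threading (bit_ranges, range_begin)
def set_bit_ranges (bits : List Int) : List (Int × Int) :=
  (bits.foldl
    (fun (st : List (Int × Int) × Int) bit_amt =>
      let range_end := st.2 + bit_amt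
      (st.1 ++ [(st.2, bit_amt)], range_end))
    ([], 0)).1

-- ===== PORT B =====
-- literal port of Source B: end := sum(bits); loop over reversed(bits) appending (end - amt, amt); reverse
def set_bit_ranges_alt (bits : List Int) : List (Int × Int) :=
  let total := bits.foldl (· + ·) 0
  let res := bits.reverse.foldl
    (fun (st : Int × List (Int × Int)) amt =>
      let e := st.1 - amt
      (e, st.2 ++ [(e, amt)]))
    (total, [])
  res.2.reverse

-- ===== PRECONDITION & SPEC =====
def Spec_set_bit_ranges (bits : List Int) (out : List (Int × Int)) : Prop := out = set_bit_ranges_alt bits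
instance (bits : List Int) (out : List (Int × Int)) : Decidable (Spec_set_bit_ranges bits out) := by unfold Spec_set_bit_ranges; infer_instance

-- ===== CLAIM =====
def Claim_equal_set_bit_ranges : Prop := ∀ (bits : List Int), Dom_set_bit_ranges bits → Spec_set_bit_ranges bits (set_bit_ranges bits)

-- ===== LEMMAS AND PROOFS =====

-- reference form: the pair list starting at offset b
def pvRanges (b : Int) : List Int → List (Int × Int)
  | [] => []
  | x :: xs => (b, x) :: pvRanges (b + x) xs

-- A's loop from (acc, b) appends pvRanges b bits
theorem pvA_foldl (bits : List Int) :
    ∀ (acc : List (Int × Int)) (b : Int),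
    (bits.foldl
      (fun (st : List (Int × Int) × Int) bit_amt =>
        let range_end := st.2 + bit_amt
        (st.1 ++ [(st.2, bit_amt)], range_end))
      (acc, b)).1 = acc ++ pvRanges b bits := by
  induction bits with
  | nil => intro acc b; simp [pvRanges]
  | cons x xs ih => intro acc b; simp only [List.foldl_cons]; rw [ih]; simp [pvRanges]

-- first component of B's loop: running end decreases by the sum of the processed part
theorem pvB_fst (l : List Int) :
    ∀ (s : Int) (acc : List (Int × Int)),
    (l.foldl
      (fun (st : Int × List (Int × Int)) amt =>
        let e := st.1 - amt
        (e, st.2 ++ [(e, amt)]))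
      (s, acc)).1 = s - l.sum := by
  induction l with
  | nil => intro s acc; simp
  | cons x xs ih => intro s acc; simp only [List.foldl_cons]; rw [ih]; simp [List.sum_cons]; ring

-- B's reversed loop output, reversed, is pvRanges at offset s - sum
theorem pvB_loop (bits : List Int) :
    ∀ (s : Int),
    ((bits.reverse.foldl
      (fun (st : Int × List (Int × Int)) amt =>
        let e := st.1 - amt
        (e, st.2 ++ [(e, amt)]))
      (s, [])).2).reverse = pvRanges (s - bits.sum) bits := by
  induction bits with
  | nil => intro s; simp [pvRanges]
  | cons x xs ih =>
      intro s
      simp only [List.reverse_cons, List.foldl_append, List.foldl_cons, List.foldl_nil]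
      simp only [List.reverse_append, List.reverse_cons]
      rw [pvB_fst, ih]
      simp [pvRanges, List.sum_cons]
      refine ⟨by ring, ?_⟩
      have h : s - (x + xs.sum) + x = s - xs.sum := by ring
      rw [h]

-- ===== VERDICT =====
theorem set_bit_ranges_spec : Claim_equal_set_bit_ranges := by
  intro bits _
  unfold Spec_set_bit_ranges set_bit_ranges set_bit_ranges_alt
  rw [pvA_foldl bits [] 0]
  rw [pvB_loop bits (bits.foldl (· + ·) 0)]
  have : bits.foldl (· + ·) 0 = bits.sum := by
    rw [List.sum_eq_foldl]
  rw [this]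
  simp
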